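-- pv_equiv track=rewrite | github.com/StealerOfKneecaps/myprograms | pChoresQuestion.py | maximizer
-- ===== SOURCE A (Python) =====
-- def maximizer(amtTime, totalChores, listyTime):
--     listy = sorted(listyTime)
--     i=0
--     total = 0
--     while i<len(listy):
--         if total+listy[i]<=amtTime:
--             total+=listy[i]
--             i+=1
--         else:
--             break
--     return i
-- ===== SOURCE B (Python) =====
-- def maximizer(amtTime, totalChores, listyTime):
--     # Selection-based greedy: no sort; repeatedly extract the minimum remaining
--     # chore while it still fits in the budget.
--     items = list(listyTime)
--     total = 0
--     count = 0
--     while items: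
--         m = min(items)
--         if total + m > amtTime:
--             break
--         total += m
--         count += 1
--         items.remove(m)
--     return count
-- ===== Notes on version B (the rewrite author's own statement) =====
-- stated objective: alternative
-- what changed: Replaces A's sort-then-greedy-scan by a sort-free selection algorithm: repeatedly extract the minimum of the remaining items (min + remove) while it fits the budget, counting extractions.
import Mathlib
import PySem

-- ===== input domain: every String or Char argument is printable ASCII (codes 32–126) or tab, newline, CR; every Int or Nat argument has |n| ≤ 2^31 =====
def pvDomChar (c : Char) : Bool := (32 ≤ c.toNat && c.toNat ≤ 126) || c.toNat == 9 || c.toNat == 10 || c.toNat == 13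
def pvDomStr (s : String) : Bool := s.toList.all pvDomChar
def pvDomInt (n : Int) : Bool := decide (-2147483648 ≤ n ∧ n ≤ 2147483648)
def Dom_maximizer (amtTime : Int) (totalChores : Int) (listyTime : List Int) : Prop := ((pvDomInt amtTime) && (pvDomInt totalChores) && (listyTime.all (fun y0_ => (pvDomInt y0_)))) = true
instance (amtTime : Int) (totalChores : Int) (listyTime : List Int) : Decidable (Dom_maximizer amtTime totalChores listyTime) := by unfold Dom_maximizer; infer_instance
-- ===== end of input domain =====

-- B replaces A's sort-then-greedy-scan by a sort-free repeated extract-min greedy (alternative algorithm).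

-- ===== PORT A =====
-- A's while loop over the sorted list: state (i, total); advance while total+listy[i] ≤ amtTime, else break.
def maximizerLoop (amtTime : Int) : List Int → Int → Int → Int
  | [], i, _ => i
  | x :: xs, i, total =>
      if total + x ≤ amtTime then maximizerLoop amtTime xs (i + 1) (total + x)
      else i

def maximizer (amtTime : Int) (totalChores : Int) (listyTime : List Int) : Int :=
  let listy := PySem.List.sorted listyTime (fun x => x) false
  maximizerLoop amtTime listy 0 0

-- ===== PORT B =====
-- termination fact for the extract-min loop, cited by decreasing_by
theorem remove?_length_lt {xs rest : List Int} {v : Int}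
    (h : PySem.List.remove? xs v = some rest) : rest.length < xs.length := by
  by_cases hv : v ∈ xs
  · rw [PySem.List.remove?_eq_some_erase xs v hv] at h
    cases h
    have h1 := List.length_erase_of_mem hv
    have h2 : 0 < xs.length := List.length_pos_of_mem hv
    omega
  · rw [(PySem.List.remove?_eq_none_iff xs v).mpr hv] at h
    simp at h

-- Source B's while loop: m = min(items); stop if it overflows the budget, else take it and remove it.
def extractMinLoop (amtTime : Int) (items : List Int) (total : Int) (count : Int) : Int :=
  match PySem.List.min? items (fun x => x) with
  | none => count
  | some m =>
      if total + m > amtTime then count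
      else
        match h : PySem.List.remove? items m with
        | none => count
        | some rest => extractMinLoop amtTime rest (total + m) (count + 1)
termination_by items.length
decreasing_by exact remove?_length_lt h

def maximizer_alt (amtTime : Int) (totalChores : Int) (listyTime : List Int) : Int :=
  extractMinLoop amtTime listyTime 0 0

-- ===== PRECONDITION & SPEC =====
def Spec_maximizer (amtTime : Int) (totalChores : Int) (listyTime : List Int) (out : Int) : Prop := out = maximizer_alt amtTime totalChores listyTime
instance (amtTime : Int) (totalChores : Int) (listyTime : List Int) (out : Int) : Decidable (Spec_maximizer amtTime totalChores listyTime out) := by unfold Spec_maximizer; infer_instance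

-- ===== CLAIM =====
def Claim_equal_maximizer : Prop := ∀ (amtTime : Int) (totalChores : Int) (listyTime : List Int), Dom_maximizer amtTime totalChores listyTime → Spec_maximizer amtTime totalChores listyTime (maximizer amtTime totalChores listyTime)

-- ===== LEMMAS AND PROOFS =====
theorem extractMinLoop_break (amtTime : Int) (items : List Int) (total count m : Int)
    (hmin : PySem.List.min? items (fun x => x) = some m) (hgt : total + m > amtTime) :
    extractMinLoop amtTime items total count = count := by
  rw [extractMinLoop]
  split
  · rfl
  · rename_i m' hm'
    rw [hmin] at hm'
    injection hm' with e
    subst e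
    rw [if_pos hgt]

theorem extractMinLoop_step (amtTime : Int) (items rest : List Int) (total count m : Int)
    (hmin : PySem.List.min? items (fun x => x) = some m) (hle : total + m ≤ amtTime)
    (hrm : PySem.List.remove? items m = some rest) :
    extractMinLoop amtTime items total count
      = extractMinLoop amtTime rest (total + m) (count + 1) := by
  rw [extractMinLoop]
  split
  · rename_i hm
    rw [hmin] at hm
    simp at hm
  · rename_i m' hm'
    rw [hmin] at hm'
    injection hm' with e
    subst e
    rw [if_neg (by omega)]
    split
    · rename_i hr
      rw [hrm] at hr
      simp at hr
    · rename_i rest' hr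
      rw [hrm] at hr
      injection hr with e
      subst e
      rfl

-- The extract-min loop on xs equals A's scan of sorted(xs); strong induction on length.
theorem extract_eq_scan (amtTime : Int) :
    ∀ (n : Nat) (xs : List Int), xs.length ≤ n → ∀ (total count : Int),
      extractMinLoop amtTime xs total count
        = maximizerLoop amtTime (PySem.List.sorted xs (fun x => x) false) count total := by
  intro n
  induction n with
  | zero =>
      intro xs hlen total count
      have : xs = [] := List.eq_nil_of_length_eq_zero (Nat.le_zero.mp hlen)
      subst this
      simp [extractMinLoop, PySem.List.min?, maximizerLoop, PySem.List.sorted]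
  | succ n ih =>
      intro xs hlen total count
      cases hxs : xs with
      | nil =>
          simp [extractMinLoop, PySem.List.min?, maximizerLoop, PySem.List.sorted]
      | cons a as =>
          subst hxs
          obtain ⟨y, t, hs⟩ : ∃ y t, PySem.List.sorted (a :: as) (fun x : Int => x) false = y :: t := by
            cases hsrt : PySem.List.sorted (a :: as) (fun x : Int => x) false with
            | nil => exact absurd ((PySem.List.sorted_eq_nil_iff (a :: as) (fun x : Int => x) false).mp hsrt) (by simp)
            | cons y t => exact ⟨y, t, rfl⟩
          cases hmin : PySem.List.min? (a :: as) (fun x : Int => x) with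
          | none => exact absurd ((PySem.List.min?_eq_none_iff (a :: as) (fun x : Int => x)).mp hmin) (by simp)
          | some m =>
            have hm_mem : m ∈ (a :: as) := PySem.List.min?_mem hmin
            have hy_mem : y ∈ (a :: as) := by
              have := PySem.List.sorted_perm (a :: as) (fun x : Int => x) false
              rw [hs] at this
              exact this.mem_iff.mp (List.mem_cons_self ..)
            have hym : y = m := by
              have h1 : y ≤ m := PySem.List.key_head_sorted_le (a :: as) (fun x : Int => x) hs m hm_mem
              have h2 : m ≤ y := PySem.List.min?_isMin hmin y hy_mem
              omega
            subst hym
            have hperm : (a :: as).Perm (y :: t) := by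
              have := PySem.List.sorted_perm (a :: as) (fun x : Int => x) false
              rw [hs] at this
              exact this.symm
            have herase : t.Perm ((a :: as).erase y) := by
              have := hperm.erase y
              simpa using this.symm
            have hpw : t.Pairwise (fun x y : Int => x ≤ y) := by
              have := PySem.List.sorted_pairwise (a :: as) (fun x : Int => x)
              rw [hs] at this
              exact (List.pairwise_cons.mp this).2
            have hsorted_erase : PySem.List.sorted ((a :: as).erase y) (fun x : Int => x) false = t :=
              PySem.List.sorted_id_eq_of_perm_of_pairwise ((a :: as).erase y) t herase hpw
            rw [hs]
            by_cases hfit : total + y ≤ amtTime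
            · have hlen' : ((a :: as).erase y).length ≤ n := by
                have := List.length_erase_of_mem hy_mem
                simp only [List.length_cons] at *
                omega
              rw [extractMinLoop_step amtTime (a :: as) ((a :: as).erase y) total count y hmin hfit
                    (PySem.List.remove?_eq_some_erase (a :: as) y hy_mem)]
              rw [maximizerLoop, if_pos hfit, ih _ hlen', hsorted_erase]
            · rw [extractMinLoop_break amtTime (a :: as) total count y hmin (by omega)]
              rw [maximizerLoop, if_neg hfit]

-- ===== VERDICT =====
theorem maximizer_spec : Claim_equal_maximizer := by
  intro amtTime totalChores listyTime _
  unfold Spec_maximizer maximizer maximizer_alt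
  rw [extract_eq_scan amtTime listyTime.length listyTime le_rfl]
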